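-- pv_equiv track=rewrite | github.com/lumen2023/SafeRL-metaDrive-SEU-AMC | assemble_metadrive_route_board.py | parse_seed_grid
-- ===== SOURCE A (Python) =====
-- from typing import Dict, List, Sequence, Tuple
--
-- def parse_seed_grid(spec: str) -> Tuple[List[int], int, int]:
--     """
--     解析 seed 网格字符串
--
--     Args:
--         spec: 种子网格字符串，分号分隔行，逗号分隔列
--
--     Returns:
--         (所有种子列表, 行数, 列数)
--
--     Example:
--         "100,124;108,158" -> ([100, 124, 108, 158], 2, 2)
--     """
--     rows = []
--     for row_text in str(spec).split(";"):
--         row_text = row_text.strip()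
--         if not row_text:
--             continue
--         row = [int(token.strip()) for token in row_text.split(",") if token.strip()]
--         if not row:
--             continue
--         rows.append(row)
--
--     if not rows:
--         raise ValueError("seed-grid 为空。")
--
--     width = len(rows[0])
--     for row in rows:
--         if len(row) != width:
--             raise ValueError("seed-grid 每一行的列数必须一致。")
--
--     seeds = [seed for row in rows for seed in row]
--     return seeds, len(rows), width
-- ===== SOURCE B (Python) =====
-- def parse_seed_grid(spec):
--     """Single pass: parse, validate width, and flatten while scanning the rows."""
--     seeds = []
--     row_count = 0
--     width = None
--     for row_text in str(spec).split(";"):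
--         row_text = row_text.strip()
--         if not row_text:
--             continue
--         row = [int(token.strip()) for token in row_text.split(",") if token.strip()]
--         if not row:
--             continue
--         if width is None:
--             width = len(row)
--         elif len(row) != width:
--             raise ValueError("seed-grid 每一行的列数必须一致。")
--         seeds.extend(row)
--         row_count += 1
--     if row_count == 0:
--         raise ValueError("seed-grid 为空。")
--     return seeds, row_count, width
-- ===== Notes on version B (the rewrite author's own statement) =====
-- stated objective: simpler
-- what changed: B parses, validates the row width and flattens in one single pass over the semicolon-separated rows with a running seeds list, row counter and width, instead of A's three passes (build rows list, then width-check loop, then flattening comprehension).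
import Mathlib
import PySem

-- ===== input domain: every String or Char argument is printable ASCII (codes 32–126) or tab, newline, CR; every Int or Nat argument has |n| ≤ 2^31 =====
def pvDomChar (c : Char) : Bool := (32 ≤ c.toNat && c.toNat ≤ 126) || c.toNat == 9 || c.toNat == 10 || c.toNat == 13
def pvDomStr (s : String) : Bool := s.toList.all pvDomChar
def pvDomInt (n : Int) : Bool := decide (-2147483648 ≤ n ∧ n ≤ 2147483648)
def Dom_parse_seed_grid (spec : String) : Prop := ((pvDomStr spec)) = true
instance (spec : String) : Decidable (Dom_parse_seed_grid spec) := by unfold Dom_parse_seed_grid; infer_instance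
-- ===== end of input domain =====

-- B does the same parsing in one pass over the semicolon-separated rows (running seeds/count/width) instead of A's
-- three passes; return values are proved equal wherever A returns.

-- shared transliteration of the identical per-row token comprehension of both Pythons:
-- [int(token.strip()) for token in row_text.split(",") if token.strip()]  (none = ValueError from int)
def pvTokens (rt : List Char) : List (List Char) :=
  ((PySem.Chars.splitOn rt [',']).map PySem.Chars.strip).filter (fun t => t ≠ [])

def pvIntsOf : List (List Char) → Option (List Int)
  | [] => some []
  | t :: ts =>
    match PySem.Int.ofChars? t with
    | none => none
    | some v =>
      match pvIntsOf ts with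
      | none => none
      | some vs => some (v :: vs)

def pvParseRow (rt : List Char) : Option (List Int) := pvIntsOf (pvTokens rt)

-- ===== PORT A =====
-- first pass of A: build the list of non-empty parsed rows (none = int() ValueError)
def pvBuildRows : List (List Char) → Option (List (List Int))
  | [] => some []
  | rt :: rest =>
    let s := PySem.Chars.strip rt
    if s = [] then pvBuildRows rest
    else
      match pvParseRow s with
      | none => none
      | some row =>
        if row = [] then pvBuildRows rest
        else
          match pvBuildRows rest with
          | none => none
          | some rows => some (row :: rows)

-- ([],0,0) marks the three ValueError exits of A; Pre_ excludes exactly those inputs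
def parse_seed_grid (spec : String) : List Int × Int × Int :=
  match pvBuildRows (PySem.Chars.splitOn spec.toList [';']) with
  | none => ([], 0, 0)
  | some rows =>
    if rows = [] then ([], 0, 0)
    else
      let width := (rows.headD []).length
      if rows.all (fun r => r.length == width) then
        (rows.flatten, (rows.length : Int), (width : Int))
      else ([], 0, 0)

-- ===== PORT B =====
-- single pass: seeds accumulated, row counter, width recorded at the first row (none = ValueError)
def pvLoopB : List (List Char) → List Int → Nat → Option Nat → Option (List Int × Nat × Nat)
  | [], seeds, cnt, w? =>
    if cnt = 0 then none
    else
      match w? with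
      | none => none
      | some w => some (seeds, cnt, w)
  | rt :: rest, seeds, cnt, w? =>
    let s := PySem.Chars.strip rt
    if s = [] then pvLoopB rest seeds cnt w?
    else
      match pvParseRow s with
      | none => none
      | some row =>
        if row = [] then pvLoopB rest seeds cnt w?
        else
          match w? with
          | none => pvLoopB rest (seeds ++ row) (cnt + 1) (some row.length)
          | some w =>
            if row.length = w then pvLoopB rest (seeds ++ row) (cnt + 1) (some w)
            else none

def parse_seed_grid_alt (spec : String) : List Int × Int × Int :=
  match pvLoopB (PySem.Chars.splitOn spec.toList [';']) [] 0 none with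
  | none => ([], 0, 0)
  | some (seeds, cnt, w) => (seeds, (cnt : Int), (w : Int))

-- ===== PRECONDITION & SPEC =====
-- the stripped token lists of each semicolon-separated row, as both Pythons compute them
def pvRowToks (spec : String) : List (List (List Char)) :=
  (PySem.Chars.splitOn spec.toList [';']).map (fun rt => pvTokens (PySem.Chars.strip rt))

-- Pre_ = exactly the inputs where Python A returns: every token is a valid int literal,
-- at least one non-empty row exists, and all non-empty rows have the same number of tokens.
def Pre_parse_seed_grid (spec : String) : Prop :=
  (∀ r ∈ pvRowToks spec, ∀ t ∈ r, (PySem.Int.ofChars? t).isSome = true) ∧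
  ((pvRowToks spec).filter (fun r => r ≠ []) ≠ [] ∧
   ∀ r ∈ (pvRowToks spec).filter (fun r => r ≠ []),
     r.length = (((pvRowToks spec).filter (fun r => r ≠ [])).headD []).length)

instance (spec : String) : Decidable (Pre_parse_seed_grid spec) := by
  unfold Pre_parse_seed_grid; infer_instance

def pvWitness_parse_seed_grid : String := "100,124;108,158"

def Spec_parse_seed_grid (spec : String) (out : List Int × Int × Int) : Prop := out = parse_seed_grid_alt spec
instance (spec : String) (out : List Int × Int × Int) : Decidable (Spec_parse_seed_grid spec out) := by unfold Spec_parse_seed_grid; infer_instance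

-- ===== CLAIM (what is proved, stated in full; the proofs are below) =====
def Claim_equal_parse_seed_grid : Prop := ∀ (spec : String), Dom_parse_seed_grid spec → Pre_parse_seed_grid spec → Spec_parse_seed_grid spec (parse_seed_grid spec)

-- ===== LEMMAS AND PROOFS =====

-- once the width is fixed, B's loop is A's width check plus A's flattening
theorem loopB_some (rts : List (List Char)) :
    ∀ (rows : List (List Int)) (seeds : List Int) (cnt w : Nat),
    pvBuildRows rts = some rows →
    pvLoopB rts seeds (cnt + 1) (some w) =
      if ∀ r ∈ rows, r.length = w then
        some (seeds ++ rows.flatten, cnt + 1 + rows.length, w)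
      else none := by
  induction rts with
  | nil =>
    intro rows seeds cnt w h
    simp [pvBuildRows] at h
    subst h
    simp [pvLoopB]
  | cons rt rest ih =>
    intro rows seeds cnt w h
    simp only [pvBuildRows, pvLoopB] at *
    by_cases hs : PySem.Chars.strip rt = []
    · simp [hs] at h ⊢
      exact ih rows seeds cnt w h
    · simp [hs] at h ⊢
      cases hpr : pvParseRow (PySem.Chars.strip rt) with
      | none => simp [hpr] at h
      | some row =>
        simp [hpr] at h ⊢
        by_cases hr : row = []
        · simp [hr] at h ⊢
          exact ih rows seeds cnt w h
        · simp [hr] at h ⊢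
          cases hbr : pvBuildRows rest with
          | none => simp [hbr] at h
          | some rows' =>
            simp [hbr] at h
            subst h
            have hih := ih rows' (seeds ++ row) (cnt + 1) w hbr
            by_cases hw : row.length = w
            · have hc : cnt + 1 + 1 + rows'.length = cnt + 1 + (rows'.length + 1) := by omega
              simp [hw, hih, hc]
            · have hnall : ¬ (∀ r ∈ row :: rows', r.length = w) := fun hc => hw (hc row (by simp))
              simp only [if_neg hnall]
              simp [hw]

theorem loopB_none (rts : List (List Char)) :
    ∀ (rows : List (List Int)),
    pvBuildRows rts = some rows →
    pvLoopB rts [] 0 none =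
      match rows with
      | [] => none
      | r0 :: rest =>
        if ∀ r ∈ rest, r.length = r0.length then
          some (r0 ++ rest.flatten, 1 + rest.length, r0.length)
        else none := by
  induction rts with
  | nil =>
    intro rows h
    simp [pvBuildRows] at h
    subst h
    simp [pvLoopB]
  | cons rt rest ih =>
    intro rows h
    simp only [pvBuildRows, pvLoopB] at *
    by_cases hs : PySem.Chars.strip rt = []
    · simp [hs] at h ⊢
      exact ih rows h
    · simp [hs] at h ⊢
      cases hpr : pvParseRow (PySem.Chars.strip rt) with
      | none => simp [hpr] at h
      | some row =>
        simp [hpr] at h ⊢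
        by_cases hr : row = []
        · simp [hr] at h ⊢
          exact ih rows h
        · simp [hr] at h ⊢
          cases hbr : pvBuildRows rest with
          | none => simp [hbr] at h
          | some rows' =>
            simp [hbr] at h
            subst h
            have := loopB_some rest rows' row 0 row.length hbr
            simpa using this

-- every token parses → pvIntsOf returns a row of the same length
theorem intsOf_some (ts : List (List Char))
    (h : ∀ t ∈ ts, (PySem.Int.ofChars? t).isSome = true) :
    ∃ vs, pvIntsOf ts = some vs ∧ vs.length = ts.length := by
  induction ts with
  | nil => exact ⟨[], rfl, rfl⟩
  | cons t ts ih =>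
    have ht := h t (by simp)
    obtain ⟨v, hv⟩ := Option.isSome_iff_exists.mp ht
    obtain ⟨vs, hvs, hlen⟩ := ih (fun t' ht' => h t' (by simp [ht']))
    exact ⟨v :: vs, by simp [pvIntsOf, hv, hvs], by simp [hlen]⟩

theorem tokens_nil : pvTokens [] = [] := by decide

-- under the token hypothesis, A's first pass succeeds and the rows' lengths are the
-- token-list lengths of the non-empty rows
theorem buildRows_some (rts : List (List Char))
    (h : ∀ rt ∈ rts, ∀ t ∈ pvTokens (PySem.Chars.strip rt), (PySem.Int.ofChars? t).isSome = true) :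
    ∃ rows, pvBuildRows rts = some rows ∧
      rows.map List.length =
        (((rts.map (fun rt => pvTokens (PySem.Chars.strip rt))).filter (fun r => r ≠ [])).map List.length) := by
  induction rts with
  | nil => exact ⟨[], rfl, rfl⟩
  | cons rt rest ih =>
    obtain ⟨rows, hrows, hlen⟩ := ih (fun rt' h1 t h2 => h rt' (by simp [h1]) t h2)
    by_cases hs : PySem.Chars.strip rt = []
    · refine ⟨rows, ?_, ?_⟩
      · simp [pvBuildRows, hs, hrows]
      · simp [hs, tokens_nil, hlen]
    · obtain ⟨vs, hvs, hvslen⟩ := intsOf_some _ (h rt (by simp))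
      by_cases ht : pvTokens (PySem.Chars.strip rt) = []
      · have hvs0 : vs = [] := by
          have := hvslen; rw [ht] at this; simpa using List.length_eq_zero_iff.mp this
        refine ⟨rows, ?_, ?_⟩
        · simp [pvBuildRows, hs, pvParseRow, hvs, hvs0, hrows]
        · simp [ht, hlen]
      · have hv : vs ≠ [] := by
          intro h0; apply ht
          rw [h0] at hvslen; exact List.length_eq_zero_iff.mp hvslen.symm
        refine ⟨vs :: rows, ?_, ?_⟩
        · simp [pvBuildRows, hs, pvParseRow, hvs, hv, hrows]
        · simp [ht, hvslen, hlen]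

-- ===== VERDICT (by name: the statement is the Claim_ definition above) =====
theorem parse_seed_grid_spec : Claim_equal_parse_seed_grid := by
  intro spec _ hpre
  obtain ⟨htok, hne, hwid⟩ := hpre
  unfold Spec_parse_seed_grid parse_seed_grid parse_seed_grid_alt
  obtain ⟨rows, hrows, hlen⟩ := buildRows_some (PySem.Chars.splitOn spec.toList [';']) (by
    intro rt h1 t h2
    exact htok _ (by simpa [pvRowToks] using List.mem_map_of_mem h1) t h2)
  rw [hrows, loopB_none _ rows hrows]
  -- rows ≠ []
  have hmapeq : rows.map List.length = ((pvRowToks spec).filter (fun r => r ≠ [])).map List.length := by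
    simpa [pvRowToks, List.filter_map] using hlen
  cases rows with
  | nil =>
    have h0 : ((pvRowToks spec).filter (fun r => r ≠ [])).map List.length = [] := hmapeq.symm
    exact absurd (List.map_eq_nil_iff.mp h0) hne
  | cons r0 rest =>
    cases htr : (pvRowToks spec).filter (fun r => r ≠ []) with
    | nil => exact absurd htr hne
    | cons t0 trest =>
      rw [htr] at hmapeq hwid
      simp only [List.map_cons, List.cons.injEq] at hmapeq
      obtain ⟨h0, hrest⟩ := hmapeq
      have hall : ∀ r ∈ rest, r.length = r0.length := by
        intro r hr
        have : r.length ∈ trest.map List.length := by rw [← hrest]; exact List.mem_map_of_mem hr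
        obtain ⟨t, ht, hteq⟩ := List.mem_map.mp this
        rw [← hteq, h0]
        simpa using hwid t (by simp [ht])
      simp [eq_true hall]
      omega
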